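-- pv_equiv track=rewrite | github.com/kr4g/Klotho | projects/experiments/notation_pipeline/core/tie_split.py | split_proportion
-- ===== SOURCE A (Python) =====
-- def _bracketing_powers(n: int) -> tuple[int, int]:
--     """Return (lower, upper) powers of 2 that bracket *n*.
--
--     Port of OM ``before&after-bin`` (rythtools.lisp:144).
--     """
--     exp = 0
--     while n >= 2 ** exp:
--         exp += 1
--     return (2 ** (exp - 1), 2 ** exp)
--
-- _FAST_ENGRAVABLE = frozenset({0, 1, 2, 3, 4, 6, 8, 12, 16, 32})
--
-- def split_proportion(n: int) -> list[int]:
--     """Decompose integer proportion *n* into engravable components.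
--
--     Port of OM ``only-one-point`` (rythtools.lisp:325).  Returns a list of
--     positive integers that sum to *n*, each representable as a single
--     notehead (power-of-2, dotted, or double-dotted).
--     """
--     if n <= 0:
--         return [n] if n == 0 else []
--     if n in _FAST_ENGRAVABLE:
--         return [n]
--     bef = _bracketing_powers(n)[0]
--     if n == bef or n == bef * 3 // 2 or n == bef * 7 // 4:
--         return [n]
--     if n > bef * 3 // 2:
--         head = bef + bef // 2
--         return [head] + split_proportion(n - head)
--     return [bef] + split_proportion(n - bef)
-- ===== SOURCE B (Python) =====
-- def _bracketing_powers(n: int) -> tuple[int, int]: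
--     exp = 0
--     while n >= 2 ** exp:
--         exp += 1
--     return (2 ** (exp - 1), 2 ** exp)
--
-- _FAST_ENGRAVABLE = frozenset({0, 1, 2, 3, 4, 6, 8, 12, 16, 32})
--
-- def split_proportion(n: int) -> list[int]:
--     """Iterative decomposition of *n* into engravable components."""
--     if n <= 0:
--         return [n] if n == 0 else []
--     out = []
--     while True:
--         if n in _FAST_ENGRAVABLE:
--             out.append(n)
--             return out
--         bef = _bracketing_powers(n)[0]
--         if n == bef or n == bef * 3 // 2 or n == bef * 7 // 4:
--             out.append(n)
--             return out
--         head = bef + bef // 2 if n > bef * 3 // 2 else bef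
--         out.append(head)
--         n -= head
-- ===== Notes on version B (the rewrite author's own statement) =====
-- stated objective: simpler
-- what changed: Replaced the recursive prepend-and-recurse decomposition with a single iterative while-loop that appends each engravable head to an accumulator list, handling the nonpositive-input guard once at the top.
import Mathlib
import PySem

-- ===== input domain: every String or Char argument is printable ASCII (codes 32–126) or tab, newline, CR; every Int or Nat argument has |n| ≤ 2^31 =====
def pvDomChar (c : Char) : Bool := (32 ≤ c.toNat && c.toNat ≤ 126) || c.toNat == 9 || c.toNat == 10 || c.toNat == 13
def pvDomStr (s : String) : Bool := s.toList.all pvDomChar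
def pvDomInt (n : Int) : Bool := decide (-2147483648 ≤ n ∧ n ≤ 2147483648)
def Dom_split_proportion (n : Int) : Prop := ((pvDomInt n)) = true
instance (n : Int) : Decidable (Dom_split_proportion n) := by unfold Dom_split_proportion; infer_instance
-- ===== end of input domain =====

-- B replaces A's recursion by an iterative accumulator loop (same checks, same output); objective: simpler (constant stack), not faster.

-- ===== PORT A =====

-- the `while n >= 2 ** exp: exp += 1` loop of _bracketing_powers
def pvBracketLoop (n : Int) (exp : Nat) : Nat :=
  if h : 2 ^ exp ≤ n then pvBracketLoop n (exp + 1) else exp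
termination_by (n + 1 - 2 ^ exp).toNat
decreasing_by
  have h1 : (0:Int) < 2 ^ exp := pow_pos (by norm_num) exp
  have h2 : (2:Int) ^ (exp + 1) = 2 * 2 ^ exp := by ring
  generalize hy : (2:Int) ^ (exp + 1) = y at *
  omega

-- exact where exp ends ≥ 1, i.e. whenever n ≥ 1 (the only calls split_proportion makes);
-- Python's 2 ** (-1) (a float) is unreachable there
def pvBracketingPowers (n : Int) : Int × Int :=
  let e := pvBracketLoop n 0
  ((2:Int) ^ (e - 1), (2:Int) ^ e)

def pvFast : List Int := [0, 1, 2, 3, 4, 6, 8, 12, 16, 32]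

def split_proportion (n : Int) : List Int :=
  if n ≤ 0 then (if n = 0 then [n] else []) else
  if n ∈ pvFast then [n] else
  let bef := (pvBracketingPowers n).1
  if n = bef ∨ n = PySem.Int.floordiv (bef * 3) 2 ∨ n = PySem.Int.floordiv (bef * 7) 4 then [n]
  else if PySem.Int.floordiv (bef * 3) 2 < n then
    let head := bef + PySem.Int.floordiv bef 2
    head :: split_proportion (n - head)
  else
    bef :: split_proportion (n - bef)
termination_by n.toNat
decreasing_by
  · have hb : (0:Int) < 2 ^ (pvBracketLoop n 0 - 1) := pow_pos (by norm_num) _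
    have hq : 0 ≤ PySem.Int.floordiv (2 ^ (pvBracketLoop n 0 - 1)) 2 := by
      rw [PySem.Int.floordiv_eq_ediv_of_pos (by norm_num)]
      exact Int.ediv_nonneg (le_of_lt hb) (by norm_num)
    simp only [pvBracketingPowers] at *
    omega
  · have hb : (0:Int) < 2 ^ (pvBracketLoop n 0 - 1) := pow_pos (by norm_num) _
    simp only [pvBracketingPowers] at *
    omega

-- ===== PORT B =====

-- the `while True` loop of Source B; fuel only makes it total (n.toNat suffices: each pass subtracts head ≥ 1)
def pvSplitLoop (fuel : Nat) (n : Int) (out : List Int) : List Int :=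
  match fuel with
  | 0 => out
  | fuel + 1 =>
    if n ∈ pvFast then out ++ [n] else
    let bef := (pvBracketingPowers n).1
    if n = bef ∨ n = PySem.Int.floordiv (bef * 3) 2 ∨ n = PySem.Int.floordiv (bef * 7) 4 then out ++ [n]
    else
      let head := if PySem.Int.floordiv (bef * 3) 2 < n then bef + PySem.Int.floordiv bef 2 else bef
      pvSplitLoop fuel (n - head) (out ++ [head])

def split_proportion_alt (n : Int) : List Int :=
  if n ≤ 0 then (if n = 0 then [n] else []) else
  pvSplitLoop n.toNat n []

-- ===== PRECONDITION & SPEC =====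
def Spec_split_proportion (n : Int) (out : List Int) : Prop := out = split_proportion_alt n
instance (n : Int) (out : List Int) : Decidable (Spec_split_proportion n out) := by unfold Spec_split_proportion; infer_instance

-- ===== CLAIM (what is proved, stated in full; the proofs are below) =====
def Claim_equal_split_proportion : Prop := ∀ (n : Int), Dom_split_proportion n → Spec_split_proportion n (split_proportion n)

-- ===== LEMMAS AND PROOFS =====

-- the bracketing loop returns the least e ≥ exp with n < 2^e
theorem pvBracketLoop_spec_aux (n : Int) (k : Nat) : ∀ (exp : Nat), (n + 1 - 2 ^ exp).toNat ≤ k →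
    exp ≤ pvBracketLoop n exp ∧ n < 2 ^ pvBracketLoop n exp ∧
      (pvBracketLoop n exp = exp ∨ (2:Int) ^ (pvBracketLoop n exp - 1) ≤ n) := by
  induction k with
  | zero =>
    intro exp hk
    rw [pvBracketLoop.eq_def]
    split
    · next h => exfalso; have h1 : (0:Int) < 2 ^ exp := pow_pos (by norm_num) exp; omega
    · next h => exact ⟨le_refl _, by omega, Or.inl rfl⟩
  | succ k ih =>
    intro exp hk
    rw [pvBracketLoop.eq_def]
    split
    · next h =>
      have h1 : (0:Int) < 2 ^ exp := pow_pos (by norm_num) exp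
      have h2 : (2:Int) ^ (exp + 1) = 2 * 2 ^ exp := by ring
      obtain ⟨i1, i2, i3⟩ := ih (exp + 1) (by omega)
      refine ⟨by omega, i2, ?_⟩
      rcases i3 with h' | h'
      · right; rw [h']; simpa using h
      · right; exact h'
    · next h => exact ⟨le_refl _, by omega, Or.inl rfl⟩

theorem pvBracketLoop_spec (n : Int) (exp : Nat) :
    exp ≤ pvBracketLoop n exp ∧ n < 2 ^ pvBracketLoop n exp ∧
      (pvBracketLoop n exp = exp ∨ (2:Int) ^ (pvBracketLoop n exp - 1) ≤ n) :=
  pvBracketLoop_spec_aux n (n + 1 - 2 ^ exp).toNat exp (le_refl _)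

-- bracketing facts used below, specialised to n ≥ 1
theorem pvBef_spec (n : Int) (hn : 0 < n) :
    0 < (pvBracketingPowers n).1 ∧ (pvBracketingPowers n).1 ≤ n := by
  obtain ⟨-, h2, h3⟩ := pvBracketLoop_spec n 0
  have hb : (0:Int) < 2 ^ (pvBracketLoop n 0 - 1) := pow_pos (by norm_num) _
  refine ⟨hb, ?_⟩
  rcases h3 with h | h
  · exfalso; rw [h] at h2; simp at h2; omega
  · exact h

theorem floordiv3_eq (b : Int) : PySem.Int.floordiv (b * 3) 2 = b + PySem.Int.floordiv b 2 := by
  rw [PySem.Int.floordiv_eq_ediv_of_pos (by norm_num), PySem.Int.floordiv_eq_ediv_of_pos (by norm_num)]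
  omega

-- loop invariant: with enough fuel and n > 0, the loop produces out ++ A's result
theorem pvSplitLoop_eq (fuel : Nat) : ∀ (n : Int) (out : List Int),
    0 < n → n.toNat ≤ fuel → pvSplitLoop fuel n out = out ++ split_proportion n := by
  induction fuel with
  | zero => intro n out hn hf; omega
  | succ fuel ih =>
    intro n out hn hf
    rw [split_proportion.eq_def, if_neg (by omega), pvSplitLoop]
    by_cases h1 : n ∈ pvFast
    · simp [h1]
    rw [if_neg h1, if_neg h1]
    set bef := (pvBracketingPowers n).1 with hbef
    obtain ⟨hbpos, hble⟩ := pvBef_spec n hn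
    rw [← hbef] at hbpos hble
    by_cases h2 : n = bef ∨ n = PySem.Int.floordiv (bef * 3) 2 ∨ n = PySem.Int.floordiv (bef * 7) 4
    · rw [if_pos h2, if_pos h2]
    rw [if_neg h2, if_neg h2]
    have hq : 0 ≤ PySem.Int.floordiv bef 2 := by
      rw [PySem.Int.floordiv_eq_ediv_of_pos (by norm_num)]
      exact Int.ediv_nonneg (le_of_lt hbpos) (by norm_num)
    by_cases h3 : PySem.Int.floordiv (bef * 3) 2 < n
    · rw [if_pos h3, if_pos h3]
      have hd3 := floordiv3_eq bef
      have hpos : 0 < n - (bef + PySem.Int.floordiv bef 2) := by omega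
      rw [ih _ _ hpos (by omega)]
      simp
    · rw [if_neg h3, if_neg h3]
      have hne : n ≠ bef := by tauto
      have hpos : 0 < n - bef := by omega
      rw [ih _ _ hpos (by omega)]
      simp

-- ===== VERDICT (by name: the statement is the Claim_ definition above) =====
theorem split_proportion_spec : Claim_equal_split_proportion := by
  intro n _
  unfold Spec_split_proportion split_proportion_alt
  by_cases h : n ≤ 0
  · rw [split_proportion.eq_def, if_pos h, if_pos h]
  · rw [if_neg h, pvSplitLoop_eq n.toNat n [] (by omega) (le_refl _)]
    simp
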